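-- pv_equiv track=rewrite | github.com/juanjo78git/project-euler | projecteuler/problems/d0100/p0120/r0120.py | calc_max_resto_pe120
-- ===== SOURCE A (Python) =====
-- def calc_resto_pe120(a, n):
--     return ((((a - 1)**n) + ((a + 1)**n)) % (a*a))
--
-- def calc_max_resto_pe120(a):
--     """ Para comprobar el ciclo, guardamos el primer valor para n = 1 """
--     ciclo = calc_resto_pe120(a, 1)
--     resto_max = 0
--     es_ciclo = False
--     n = 1
--
--     while (not es_ciclo):
--         n = n + 1
--         resto = calc_resto_pe120(a, n)
--
--         if resto > resto_max:
--             resto_max = resto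
--
--         if resto == ciclo:
--             es_ciclo = True
--
--     return resto_max
-- ===== SOURCE B (Python) =====
-- def calc_max_resto_pe120(a):
--     # Closed form: by the binomial theorem, ((a-1)**n + (a+1)**n) % a**2 is
--     # 2 for even n and (2*n*a) % a**2 for odd n; the maximum over the cycle
--     # is 2*|a|*((|a|-1)//2), except that for |a| <= 2 the even-n value 2
--     # (or 0 when a**2 == 1) dominates.
--     m = abs(a)
--     if m <= 1:
--         return 0
--     return max(2, 2 * m * ((m - 1) // 2))
-- ===== Notes on version B (the rewrite author's own statement) =====
-- stated objective: faster
-- what changed: Replaces the big-integer power loop with cycle detection by an O(1) closed form derived from the binomial expansion of (a-1)^n+(a+1)^n mod a^2 (max(2, 2*|a|*((|a|-1)//2)) for |a|>=2, 0 for |a|=1).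
import Mathlib
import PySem

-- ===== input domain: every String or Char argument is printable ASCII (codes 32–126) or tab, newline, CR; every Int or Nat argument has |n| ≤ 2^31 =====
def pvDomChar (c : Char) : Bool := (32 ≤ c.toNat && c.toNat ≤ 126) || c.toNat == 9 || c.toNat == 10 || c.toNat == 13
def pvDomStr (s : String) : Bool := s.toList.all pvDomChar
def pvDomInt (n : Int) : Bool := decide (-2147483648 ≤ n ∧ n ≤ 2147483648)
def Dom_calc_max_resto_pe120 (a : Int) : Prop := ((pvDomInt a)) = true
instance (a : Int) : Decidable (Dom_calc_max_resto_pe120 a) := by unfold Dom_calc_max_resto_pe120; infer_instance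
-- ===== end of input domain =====

-- B replaces A's big-integer power loop with cycle detection by an O(1) closed form
-- from the binomial expansion of (a-1)^n+(a+1)^n mod a^2 (objective: faster).


-- ===== PORT A =====
-- helper calc_resto_pe120; the loop counter n is always a positive int, ported as Nat
def calc_resto_pe120 (a : Int) (n : Nat) : Int :=
  PySem.Int.mod ((a - 1) ^ n + (a + 1) ^ n) (a * a)

-- the 'while not es_ciclo' loop; the fuel argument only makes the recursion total
-- (under Pre_ the cycle is provably reached before the fuel runs out)
def pvLoopA (a ciclo : Int) : Nat → Nat → Int → Int
  | 0, _, resto_max => resto_max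
  | fuel + 1, n, resto_max =>
      let n' := n + 1
      let resto := calc_resto_pe120 a n'
      let resto_max' := if resto > resto_max then resto else resto_max
      if resto = ciclo then resto_max' else pvLoopA a ciclo fuel n' resto_max'

def calc_max_resto_pe120 (a : Int) : Int :=
  pvLoopA a (calc_resto_pe120 a 1) (2 * a.natAbs + 2) 1 0

-- ===== PORT B =====
def calc_max_resto_pe120_alt (a : Int) : Int :=
  let m := |a|
  if m ≤ 1 then 0 else max 2 (2 * m * PySem.Int.floordiv (m - 1) 2)

-- ===== PRECONDITION & SPEC =====
-- Pre_ excludes only a = 0, where Python A raises ZeroDivisionError (modulo a*a = 0).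
def Pre_calc_max_resto_pe120 (a : Int) : Prop := a ≠ 0
instance (a : Int) : Decidable (Pre_calc_max_resto_pe120 a) := by unfold Pre_calc_max_resto_pe120; infer_instance
def pvWitness_calc_max_resto_pe120 : Int := 5


def Spec_calc_max_resto_pe120 (a : Int) (out : Int) : Prop := out = calc_max_resto_pe120_alt a
instance (a : Int) (out : Int) : Decidable (Spec_calc_max_resto_pe120 a out) := by unfold Spec_calc_max_resto_pe120; infer_instance

-- ===== CLAIM (what is proved, stated in full; the proofs are below) =====
def Claim_equal_calc_max_resto_pe120 : Prop := ∀ (a : Int), Dom_calc_max_resto_pe120 a → Pre_calc_max_resto_pe120 a → Spec_calc_max_resto_pe120 a (calc_max_resto_pe120 a)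

-- ===== LEMMAS AND PROOFS =====

-- binomial congruences mod a^2
theorem pvPowAdd (a : Int) : ∀ n : Nat, (a + 1) ^ n ≡ 1 + n * a [ZMOD a * a] := by
  intro n
  induction n with
  | zero => simp
  | succ n ih =>
      have h1 : (a + 1) ^ (n + 1) = (a + 1) ^ n * (a + 1) := by ring
      have h2 : (a + 1) ^ n * (a + 1) ≡ (1 + n * a) * (a + 1) [ZMOD a * a] := ih.mul_right _
      have h3 : (1 + (n : Int) * a) * (a + 1) ≡ 1 + ((n : Nat) + 1 : Nat) * a [ZMOD a * a] :=
        Int.modEq_iff_dvd.mpr ⟨-(n : Int), by push_cast; ring⟩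
      rw [h1]; exact h2.trans h3

theorem pvPowSub (a : Int) : ∀ n : Nat, (a - 1) ^ n ≡ (-1) ^ n * (1 - n * a) [ZMOD a * a] := by
  intro n
  induction n with
  | zero => simp
  | succ n ih =>
      have h1 : (a - 1) ^ (n + 1) = (a - 1) ^ n * (a - 1) := by ring
      have h2 : (a - 1) ^ n * (a - 1) ≡ ((-1) ^ n * (1 - n * a)) * (a - 1) [ZMOD a * a] := ih.mul_right _
      have h3 : ((-1 : Int) ^ n * (1 - (n : Int) * a)) * (a - 1) ≡
          (-1) ^ ((n : Nat) + 1 : Nat) * (1 - ((n : Nat) + 1 : Nat) * a) [ZMOD a * a] :=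
        Int.modEq_iff_dvd.mpr ⟨(-1) ^ n * (n : Int), by push_cast; ring⟩
      rw [h1]; exact h2.trans h3

-- closed form of calc_resto_pe120 for |a| ≥ 2
theorem pvRestoChar (a : Int) (ha : 2 ≤ |a|) (n : Nat) :
    calc_resto_pe120 a n =
      if n % 2 = 0 then 2 else (2 * n * a) % (a * a) := by
  have ha0 : a ≠ 0 := by
    intro h; rw [h] at ha; norm_num at ha
  have hpos : 0 < a * a := mul_self_pos.mpr ha0
  have h4 : 4 ≤ a * a := by nlinarith [sq_abs a, abs_nonneg a]
  have hsum : (a - 1) ^ n + (a + 1) ^ n ≡ (-1) ^ n * (1 - n * a) + (1 + n * a) [ZMOD a * a] :=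
    (pvPowSub a n).add (pvPowAdd a n)
  unfold calc_resto_pe120
  rw [PySem.Int.mod_eq_emod_of_pos hpos]
  by_cases he : n % 2 = 0
  · have hneg : (-1 : Int) ^ n = 1 := Even.neg_one_pow (Nat.even_iff.mpr he)
    have h2 : ((-1 : Int) ^ n * (1 - n * a) + (1 + n * a)) = 2 := by rw [hneg]; ring
    rw [h2] at hsum
    rw [if_pos he]
    calc ((a - 1) ^ n + (a + 1) ^ n) % (a * a) = 2 % (a * a) := hsum
      _ = 2 := Int.emod_eq_of_lt (by norm_num) (by omega)
  · have hneg : (-1 : Int) ^ n = -1 := Odd.neg_one_pow (Nat.odd_iff.mpr (by omega))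
    have h2 : ((-1 : Int) ^ n * (1 - n * a) + (1 + n * a)) = 2 * n * a := by rw [hneg]; ring
    rw [h2] at hsum
    rw [if_neg he]
    exact hsum

-- generic evaluation of the loop: if the cycle value first recurs at step N,
-- every visited value is ≤ F, and F is attained (or already held), the loop returns F
theorem pvLoopMax (a ciclo F : Int) : ∀ (fuel n : Nat) (rm : Int) (N : Nat),
    n < N → N ≤ n + fuel →
    (∀ k, n < k → k < N → calc_resto_pe120 a k ≠ ciclo) →
    calc_resto_pe120 a N = ciclo →
    (∀ k, n < k → k ≤ N → calc_resto_pe120 a k ≤ F) →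
    ((∃ k, n < k ∧ k ≤ N ∧ calc_resto_pe120 a k = F) ∨ rm = F) →
    rm ≤ F →
    pvLoopA a ciclo fuel n rm = F := by
  intro fuel
  induction fuel with
  | zero => intro n rm N h1 h2 _ _ _ _ _; omega
  | succ fuel ih =>
      intro n rm N h1 h2 hno hstop hub hat hrm
      simp only [pvLoopA]
      set r := calc_resto_pe120 a (n + 1) with hr
      have hle : r ≤ F := hub (n + 1) (by omega) (by omega)
      by_cases hc : r = ciclo
      · rw [if_pos hc]
        have hN : N = n + 1 := by
          by_contra hne
          exact hno (n + 1) (by omega) (by omega) hc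
        rcases hat with ⟨k, hk1, hk2, hk3⟩ | hF
        · have hk : k = n + 1 := by omega
          rw [hk, ← hr] at hk3
          split_ifs with h <;> omega
        · split_ifs with h <;> omega
      · rw [if_neg hc]
        have hN : n + 1 < N := by
          rcases Nat.lt_or_ge (n + 1) N with h | h
          · exact h
          · have hEq : N = n + 1 := by omega
            rw [hEq, ← hr] at hstop
            exact absurd hstop hc
        apply ih (n + 1) _ N hN (by omega)
          (fun k hk1 hk2 => hno k (by omega) hk2) hstop
          (fun k hk1 hk2 => hub k (by omega) hk2)
        · rcases hat with ⟨k, hk1, hk2, hk3⟩ | hF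
          · by_cases hk : k = n + 1
            · rw [hk, ← hr] at hk3
              right
              split_ifs with h <;> omega
            · exact Or.inl ⟨k, by omega, hk2, hk3⟩
          · right
            split_ifs with h <;> omega
        · split_ifs with h <;> omega

-- the first value recurs at step k iff k is odd and m = |a| divides 2(k-1)
theorem pvCycleIff (a : Int) (m : Nat) (hm : (m : Int) = |a|) (h3 : 3 ≤ m)
    (k : Nat) (hk : 1 ≤ k) :
    (calc_resto_pe120 a k = calc_resto_pe120 a 1 ↔ (k % 2 = 1 ∧ m ∣ 2 * (k - 1))) := by
  have hb2 : (2 : Int) ≤ |a| := by omega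
  have ha0 : a ≠ 0 := by intro h; rw [h] at hb2; norm_num at hb2
  have haa : a * a = (m : Int) * (m : Int) := by
    rw [← abs_mul_abs_self a, ← hm]
  have hc1 : calc_resto_pe120 a 1 = (2 * a) % (a * a) := by
    rw [pvRestoChar a hb2 1]
    norm_num
  rw [pvRestoChar a hb2 k, hc1]
  by_cases he : k % 2 = 0
  · rw [if_pos he]
    constructor
    · intro h
      exfalso
      have h2 : (2 : Int) % (a * a) = 2 := Int.emod_eq_of_lt (by norm_num) (by nlinarith)
      have hmeq : (2 : Int) ≡ 2 * a [ZMOD a * a] := by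
        unfold Int.ModEq
        rw [h2]; exact h
      have hdvd : a * a ∣ 2 * a - 2 := Int.modEq_iff_dvd.mp hmeq
      have hz : 2 * a - 2 = 0 := by
        refine Int.eq_zero_of_abs_lt_dvd hdvd ?_
        have hup : |2 * a - 2| ≤ 2 * |a| + 2 := by
          calc |2 * a - 2| ≤ |2 * a| + |(2 : Int)| := abs_sub _ _
            _ = 2 * |a| + 2 := by rw [abs_mul]; norm_num
        nlinarith
      have ha1 : a = 1 := by omega
      rw [ha1] at hb2; norm_num at hb2
    · intro ⟨h1, _⟩; omega
  · rw [if_neg he]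
    have hcast : (2 * ((k : Int) - 1)) = ((2 * (k - 1) : Nat) : Int) := by
      push_cast [hk]; ring
    have hstep : ((2 * (k : Int) * a) % (a * a) = (2 * a) % (a * a)) ↔ (m : Int) ∣ 2 * ((k : Int) - 1) := by
      constructor
      · intro h
        have hdvd : a * a ∣ 2 * a - 2 * (k : Int) * a := Int.modEq_iff_dvd.mp h
        have hdvd2 : a * a ∣ (2 * ((k : Int) - 1)) * a := by
          have hrw : (2 * ((k : Int) - 1)) * a = -(2 * a - 2 * (k : Int) * a) := by ring
          rw [hrw]; exact hdvd.neg_right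
        have hfin := (mul_dvd_mul_iff_right ha0).mp hdvd2
        rwa [← abs_dvd, ← hm] at hfin
      · intro h
        rw [hm, abs_dvd] at h
        have hdvd2 : a * a ∣ (2 * ((k : Int) - 1)) * a :=
          (mul_dvd_mul_iff_right ha0).mpr h
        have hdvd : a * a ∣ 2 * a - 2 * (k : Int) * a := by
          have hrw : 2 * a - 2 * (k : Int) * a = -((2 * ((k : Int) - 1)) * a) := by ring
          rw [hrw]; exact hdvd2.neg_right
        exact (Int.modEq_iff_dvd.mpr hdvd)
    rw [hstep, hcast, Int.natCast_dvd_natCast]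
    constructor
    · intro h; exact ⟨by omega, h⟩
    · intro ⟨_, h⟩; exact h

-- upper bound: every remainder in the cycle is at most 2*m*((m-1)/2)
theorem pvUB (a : Int) (m : Nat) (hm : (m : Int) = |a|) (h3 : 3 ≤ m) (k : Nat) :
    calc_resto_pe120 a k ≤ 2 * (m : Int) * (((m - 1) / 2 : Nat) : Int) := by
  have hb2 : (2 : Int) ≤ |a| := by omega
  have ha0 : a ≠ 0 := by intro h; rw [h] at hb2; norm_num at hb2
  have haa : a * a = (m : Int) * (m : Int) := by
    rw [← abs_mul_abs_self a, ← hm]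
  have hm3 : (3 : Int) ≤ (m : Int) := by exact_mod_cast h3
  have hmpos : (0 : Int) < (m : Int) := by omega
  set Q : Int := (((m - 1) / 2 : Nat) : Int) with hQdef
  have hq1 : (1 : Int) ≤ Q := by simp only [hQdef]; omega
  rw [pvRestoChar a hb2 k]
  by_cases he : k % 2 = 0
  · rw [if_pos he]; nlinarith
  · rw [if_neg he]
    set v := (2 * (k : Int) * a) % (a * a) with hv
    have hv0 : 0 ≤ v := Int.emod_nonneg _ (by intro h; exact ha0 (by nlinarith [mul_self_nonneg a]))
    have hvlt : v < a * a := Int.emod_lt_of_pos _ (mul_self_pos.mpr ha0)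
    by_cases hpar : m % 2 = 1
    · have h2Q : 2 * Q = (m : Int) - 1 := by simp only [hQdef]; omega
      have hdvdnum : (m : Int) ∣ 2 * (k : Int) * a := by
        rw [hm, abs_dvd]; exact ⟨2 * (k : Int), by ring⟩
      have hdvdaa : (m : Int) ∣ a * a := by rw [haa]; exact ⟨(m : Int), rfl⟩
      have hdvdv : (m : Int) ∣ v := by
        rw [hv, Int.emod_def]
        exact dvd_sub hdvdnum (hdvdaa.mul_right _)
      rcases hdvdv with ⟨w, hw⟩
      rw [hw, haa] at hvlt
      have hwlt : w < (m : Int) := lt_of_mul_lt_mul_left hvlt (by omega)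
      rw [hw]
      nlinarith
    · have h2Q : 2 * Q = (m : Int) - 2 := by simp only [hQdef]; omega
      have hme : (m : Int) = 2 * ((m / 2 : Nat) : Int) := by omega
      have hdvd2 : (2 * (m : Int)) ∣ 2 * (k : Int) * a := by
        have h1 : (m : Int) ∣ (k : Int) * a := by
          rw [hm, abs_dvd]; exact ⟨(k : Int), by ring⟩
        have := mul_dvd_mul_left 2 h1
        have hrw : 2 * ((k : Int) * a) = 2 * (k : Int) * a := by ring
        rwa [hrw] at this
      have hdvdaa : (2 * (m : Int)) ∣ a * a :=
        ⟨((m / 2 : Nat) : Int), by linear_combination haa + (m : Int) * hme⟩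
      have hdvdv : (2 * (m : Int)) ∣ v := by
        rw [hv, Int.emod_def]
        exact dvd_sub hdvd2 (hdvdaa.mul_right _)
      rcases hdvdv with ⟨w, hw⟩
      have hQ2 : Q = ((m / 2 : Nat) : Int) - 1 := by simp only [hQdef]; omega
      have haa2 : a * a = (2 * (m : Int)) * ((m / 2 : Nat) : Int) := by
        linear_combination haa + (m : Int) * hme
      rw [hw, haa2] at hvlt
      have hwlt : w < ((m / 2 : Nat) : Int) := lt_of_mul_lt_mul_left hvlt (by omega)
      rw [hw]
      nlinarith


-- a single loop value equal to F, given an explicit multiple-of-a² decomposition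
theorem pvHit (a : Int) (hb2 : 2 ≤ |a|) (F t : Int) (k : Nat) (hko : ¬ (k % 2 = 0))
    (hrw : 2 * (k : Int) * a = F + (a * a) * t) (hF0 : 0 ≤ F) (hFlt : F < a * a) :
    calc_resto_pe120 a k = F := by
  rw [pvRestoChar a hb2 k, if_neg hko, hrw, Int.add_mul_emod_self_left]
  exact Int.emod_eq_of_lt hF0 hFlt

-- the whole equivalence for |a| ≥ 3
theorem pvMain (a : Int) (m : Nat) (hm : (m : Int) = |a|) (h3 : 3 ≤ m) :
    calc_max_resto_pe120 a = calc_max_resto_pe120_alt a := by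
  by_cases hsmall : m ≤ 4
  · have hc : a = 3 ∨ a = -3 ∨ a = 4 ∨ a = -4 := by
      rcases abs_cases a with ⟨h1, _⟩ | ⟨h1, _⟩ <;> omega
    rcases hc with h | h | h | h <;> subst h <;> decide
  · have h5 : 5 ≤ m := by omega
    have hb2 : (2 : Int) ≤ |a| := by omega
    have ha0 : a ≠ 0 := by intro h; rw [h] at hb2; norm_num at hb2
    have hm5 : (5 : Int) ≤ (m : Int) := by exact_mod_cast h5
    have hab : a = (m : Int) ∨ a = -(m : Int) := by
      rcases abs_cases a with ⟨h1, _⟩ | ⟨h1, _⟩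
      · left; omega
      · right; omega
    have haa : a * a = (m : Int) * (m : Int) := by
      rw [← abs_mul_abs_self a, ← hm]
    set Q : Int := (((m - 1) / 2 : Nat) : Int) with hQdef
    have hq2 : (2 : Int) ≤ Q := by simp only [hQdef]; omega
    set F : Int := 2 * (m : Int) * Q with hF
    have hF0 : (0 : Int) ≤ F := by nlinarith
    have hFlt : F < a * a := by
      have h2q : 2 * Q ≤ (m : Int) - 1 := by simp only [hQdef]; omega
      rw [haa]; nlinarith
    have hrhs : calc_max_resto_pe120_alt a = F := by
      simp only [calc_max_resto_pe120_alt]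
      rw [← hm]
      rw [if_neg (by omega : ¬ ((m : Int) ≤ 1))]
      have hc1 : ((m : Int) - 1) = ((m - 1 : Nat) : Int) := by omega
      rw [hc1]
      have hfd : PySem.Int.floordiv ((m - 1 : Nat) : Int) (2 : Int) = (((m - 1) / 2 : Nat) : Int) := by
        exact_mod_cast PySem.Int.floordiv_natCast (m - 1) 2
      rw [hfd, max_eq_right (by nlinarith)]
    rw [hrhs]
    unfold calc_max_resto_pe120
    have hnat : a.natAbs = m := by
      have h := Int.abs_eq_natAbs a
      omega
    rw [hnat]
    set N : Nat := if m % 2 = 1 then 2 * m + 1 else (if (m / 2) % 2 = 1 then m + 1 else m / 2 + 1) with hN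
    have hN1 : 1 < N := by simp only [hN]; split_ifs <;> omega
    have hNle : N ≤ 1 + (2 * m + 2) := by simp only [hN]; split_ifs <;> omega
    apply pvLoopMax a (calc_resto_pe120 a 1) F (2 * m + 2) 1 0 N hN1 hNle
    · -- no recurrence of the first value strictly before N
      intro k hk1 hkN
      rw [Ne, pvCycleIff a m hm (by omega) k (by omega)]
      rintro ⟨hodd, hdvd⟩
      simp only [hN] at hkN
      rcases hdvd with ⟨t, ht⟩
      have hk2m : k < 2 * m + 1 := by split_ifs at hkN <;> omega
      have htlt : t < 4 := by
        by_contra hcon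
        rw [Nat.not_lt] at hcon
        have h4 : m * 4 ≤ m * t := Nat.mul_le_mul_left m hcon
        omega
      split_ifs at hkN <;> interval_cases t <;> omega
    · -- the first value recurs at N
      rw [pvCycleIff a m hm (by omega) N (by omega)]
      constructor
      · simp only [hN]; split_ifs <;> omega
      · simp only [hN]; split_ifs with hp hq
        · exact ⟨4, by omega⟩
        · exact ⟨2, by omega⟩
        · exact ⟨1, by omega⟩
    · -- upper bound
      intro k _ _
      exact pvUB a m hm (by omega) k
    · -- the bound F is attained
      left
      by_cases hp : m % 2 = 1
      · have hNval : N = 2 * m + 1 := by simp only [hN]; rw [if_pos hp]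
        have h2Q : 2 * Q = (m : Int) - 1 := by simp only [hQdef]; omega
        by_cases hq4 : m % 4 = 1
        · rcases hab with ha | ha
          · refine ⟨(m - 1) / 2 + m, by omega, by omega, ?_⟩
            refine pvHit a hb2 F 2 _ (by omega) ?_ hF0 hFlt
            have hcast : 2 * (((m - 1) / 2 + m : Nat) : Int) = 3 * (m : Int) - 1 := by
              push_cast; omega
            rw [ha]; linear_combination (m : Int) * hcast - (m : Int) * h2Q + hF
          · refine ⟨(m + 1) / 2, by omega, by omega, ?_⟩
            refine pvHit a hb2 F (-2) _ (by omega) ?_ hF0 hFlt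
            have hcast : 2 * (((m + 1) / 2 : Nat) : Int) = (m : Int) + 1 := by
              push_cast; omega
            rw [ha]; linear_combination (-(m : Int)) * hcast - (m : Int) * h2Q + hF
        · rcases hab with ha | ha
          · refine ⟨(m - 1) / 2, by omega, by omega, ?_⟩
            refine pvHit a hb2 F 0 _ (by omega) ?_ hF0 hFlt
            have hcast : 2 * (((m - 1) / 2 : Nat) : Int) = (m : Int) - 1 := by
              push_cast; omega
            rw [ha]; linear_combination (m : Int) * hcast - (m : Int) * h2Q + hF
          · refine ⟨(m + 1) / 2 + m, by omega, by omega, ?_⟩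
            refine pvHit a hb2 F (-4) _ (by omega) ?_ hF0 hFlt
            have hcast : 2 * (((m + 1) / 2 + m : Nat) : Int) = 3 * (m : Int) + 1 := by
              push_cast; omega
            rw [ha]; linear_combination (-(m : Int)) * hcast - (m : Int) * h2Q + hF
      · have h2Q : 2 * Q = (m : Int) - 2 := by simp only [hQdef]; omega
        by_cases hq4 : (m / 2) % 2 = 1
        · have hNval : N = m + 1 := by
            simp only [hN]; rw [if_neg (by omega), if_pos hq4]
          rcases hab with ha | ha
          · refine ⟨m - 1, by omega, by omega, ?_⟩
            refine pvHit a hb2 F 1 _ (by omega) ?_ hF0 hFlt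
            have hcast : 2 * ((m - 1 : Nat) : Int) = 2 * (m : Int) - 2 := by
              omega
            rw [ha]; linear_combination (m : Int) * hcast - (m : Int) * h2Q + hF
          · refine ⟨m + 1, by omega, by omega, ?_⟩
            refine pvHit a hb2 F (-3) _ (by omega) ?_ hF0 hFlt
            have hcast : 2 * ((m + 1 : Nat) : Int) = 2 * (m : Int) + 2 := by
              omega
            rw [ha]; linear_combination (-(m : Int)) * hcast - (m : Int) * h2Q + hF
        · have hNval : N = m / 2 + 1 := by
            simp only [hN]; rw [if_neg (by omega), if_neg hq4]
          rcases hab with ha | ha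
          · refine ⟨m / 2 - 1, by omega, by omega, ?_⟩
            refine pvHit a hb2 F 0 _ (by omega) ?_ hF0 hFlt
            have hcast : 2 * ((m / 2 - 1 : Nat) : Int) = (m : Int) - 2 := by
              omega
            rw [ha]; linear_combination (m : Int) * hcast - (m : Int) * h2Q + hF
          · refine ⟨m / 2 + 1, by omega, by omega, ?_⟩
            refine pvHit a hb2 F (-2) _ (by omega) ?_ hF0 hFlt
            have hcast : 2 * ((m / 2 + 1 : Nat) : Int) = (m : Int) + 2 := by
              push_cast; omega
            rw [ha]; linear_combination (-(m : Int)) * hcast - (m : Int) * h2Q + hF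
    · exact hF0

-- ===== VERDICT (by name: the statement is the Claim_ definition above) =====
theorem calc_max_resto_pe120_spec : Claim_equal_calc_max_resto_pe120 := by
  intro a hdom hpre
  unfold Spec_calc_max_resto_pe120
  obtain ⟨m, hm⟩ : ∃ m : Nat, (m : Int) = |a| := ⟨a.natAbs, by simp⟩
  by_cases h3 : 3 ≤ m
  · exact pvMain a m hm h3
  · have : a = 1 ∨ a = -1 ∨ a = 2 ∨ a = -2 := by
      unfold Pre_calc_max_resto_pe120 at hpre
      rcases abs_cases a with ⟨h1, h2⟩ | ⟨h1, h2⟩ <;> omega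
    rcases this with h | h | h | h <;> subst h <;> decide
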